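-- pv_equiv track=rewrite | github.com/garbaczdev/adventofcode | 2015/17/solve.py | part2
-- ===== SOURCE A (Python) =====
-- def part2(_in, eggnog=150):
--
--     min_number = float("inf")
--
--     for i in range(2**len(_in)):
--         bitmask = bin(i)[2:].zfill(len(_in))
--         containers = [
--             container
--             for i, container in enumerate(_in)
--             if bitmask[i] == "1"
--         ]
--         if len(containers) < min_number and sum(containers) == eggnog:
--             min_number = len(containers)
--             min_containers = containers
--
--     min_containers_count = 0
--
--     for i in range(2**len(_in)):
--         bitmask = bin(i)[2:].zfill(len(_in))
--         containers = [
--             container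
--             for i, container in enumerate(_in)
--             if bitmask[i] == "1"
--         ]
--         if len(containers) == min_number and sum(containers) == eggnog:
--             min_containers_count += 1
--
--     return min_containers_count
-- ===== SOURCE B (Python) =====
-- def part2(_in, eggnog=150):
--     # dp maps (size, sum) -> number of subsets of the processed prefix
--     # having that size and that sum.
--     dp = {(0, 0): 1}
--     for c in _in:
--         new = dict(dp)
--         for (k, s), cnt in dp.items():
--             key = (k + 1, s + c)
--             new[key] = new.get(key, 0) + cnt
--         dp = new
--     sizes = [k for (k, s) in dp if s == eggnog]
--     if not sizes:
--         return 0
--     return dp.get((min(sizes), eggnog), 0)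
-- ===== Notes on version B (the rewrite author's own statement) =====
-- stated objective: alternative
-- what changed: B replaces A's two passes over all 2^n bitmask subsets by a single dynamic-programming pass maintaining a dictionary that counts subsets per (size, sum), then reads off the count at the smallest size reaching the eggnog sum (much faster when subset sums collide, e.g. bounded container sizes; same worst case on inputs with all-distinct subset sums).
import Mathlib
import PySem

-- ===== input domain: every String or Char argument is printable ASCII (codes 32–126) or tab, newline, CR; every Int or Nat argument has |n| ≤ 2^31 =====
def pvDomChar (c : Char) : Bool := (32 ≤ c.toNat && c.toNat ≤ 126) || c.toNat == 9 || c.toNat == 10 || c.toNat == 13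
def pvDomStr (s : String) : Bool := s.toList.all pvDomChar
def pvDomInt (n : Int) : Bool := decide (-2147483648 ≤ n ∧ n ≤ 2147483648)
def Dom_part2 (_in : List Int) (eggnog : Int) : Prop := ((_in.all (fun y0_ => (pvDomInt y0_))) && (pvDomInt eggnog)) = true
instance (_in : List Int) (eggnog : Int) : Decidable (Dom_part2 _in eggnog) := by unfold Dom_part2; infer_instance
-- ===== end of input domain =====

-- B replaces A's double enumeration of all 2^n bitmask subsets by a single DP pass
-- counting subsets per (size, sum); a different algorithm of the same worst-case cost.

-- ===== PORT A =====
-- helper for A's repeated list comprehension: containers selected by bitmask bin(i)[2:].zfill(len(xs))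
def pvContainers (xs : List Int) (i : Int) : List Int :=
  let bitmask := PySem.Chars.zfill (PySem.List.slice (PySem.Int.toBinChars0b i) (some 2) none) (PySem.List.len xs)
  ((PySem.List.enumerate xs).filter (fun p => PySem.List.pyGet? bitmask p.1 == some '1')).map (fun p => p.2)

-- min_number = none plays float("inf"); min_containers is tracked exactly as A does (unused afterwards)
def part2 (_in : List Int) (eggnog : Int) : Int :=
  let st := (PySem.List.pyRange 0 (2 ^ _in.length) 1).foldl
    (fun (st : Option Int × List Int) i =>
      let containers := pvContainers _in i
      if ((match st.1 with
           | none => true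
           | some v => decide (PySem.List.len containers < v)) && (containers.sum == eggnog))
      then (some (PySem.List.len containers), containers) else st)
    (none, [])
  (PySem.List.pyRange 0 (2 ^ _in.length) 1).foldl
    (fun (cnt : Int) i =>
      let containers := pvContainers _in i
      if ((match st.1 with
           | none => false
           | some v => PySem.List.len containers == v) && (containers.sum == eggnog))
      then cnt + 1 else cnt)
    0

-- ===== PORT B =====
def part2_alt (_in : List Int) (eggnog : Int) : Int :=
  let dp0 : PySem.Dict (Int × Int) Int := PySem.Dict.empty.insert (0, 0) 1
  let dp := _in.foldl (fun dp c =>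
      dp.items.foldl (fun new p =>
        let key := (p.1.1 + 1, p.1.2 + c)
        new.insert key (new.getD key 0 + p.2)) dp) dp0
  let sizes := (dp.items.filter (fun p => p.1.2 == eggnog)).map (fun p => p.1.1)
  match PySem.List.min? sizes (fun k => k) with
  | none => 0
  | some m => dp.getD (m, eggnog) 0

-- ===== PRECONDITION & SPEC =====
def Spec_part2 (_in : List Int) (eggnog : Int) (out : Int) : Prop := out = part2_alt _in eggnog
instance (_in : List Int) (eggnog : Int) (out : Int) : Decidable (Spec_part2 _in eggnog out) := by unfold Spec_part2; infer_instance

-- ===== CLAIM (what is proved, stated in full; the proofs are below) =====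
def Claim_equal_part2 : Prop := ∀ (_in : List Int) (eggnog : Int), Dom_part2 _in eggnog → Spec_part2 _in eggnog (part2 _in eggnog)

-- ===== LEMMAS AND PROOFS =====

def pvBits (n : Nat) : List Char :=
  if h : n < 2 then [Nat.digitChar n]
  else pvBits (n / 2) ++ [Nat.digitChar (n % 2)]
decreasing_by exact Nat.div_lt_self (by omega) (by omega)

def pvPad (w : Nat) (cs : List Char) : List Char := List.replicate (w - cs.length) '0' ++ cs

lemma pvBits_toDigitsCore : ∀ (f n : Nat) (acc : List Char), n < f →
    Nat.toDigitsCore 2 f n acc = pvBits n ++ acc := by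
  intro f
  induction f with
  | zero => omega
  | succ f ih =>
    intro n acc h
    rw [Nat.toDigitsCore]
    by_cases h2 : n / 2 = 0
    · have hn : n < 2 := by omega
      rw [pvBits]
      simp [h2, hn]
      congr 1
      omega
    · simp only [h2, if_false]
      rw [ih (n / 2) _ (by omega)]
      conv_rhs => rw [pvBits]
      have : ¬ n < 2 := by omega
      simp [this]
lemma pvBits_eq_toDigits (n : Nat) : Nat.toDigits 2 n = pvBits n := by
  have := pvBits_toDigitsCore (n + 1) n [] (by omega)
  simpa [Nat.toDigits] using this

lemma pvBits_ne_nil (n : Nat) : pvBits n ≠ [] := by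
  rw [pvBits]; split <;> simp

lemma pvBits_mem (n : Nat) : ∀ c ∈ pvBits n, c = '0' ∨ c = '1' := by
  induction n using Nat.strong_induction_on with
  | _ n ih =>
    rw [pvBits]
    split
    · rename_i h
      interval_cases n <;> simp [Nat.digitChar]
    · rename_i h
      intro c hc
      simp only [List.mem_append, List.mem_singleton] at hc
      rcases hc with hc | hc
      · exact ih (n / 2) (Nat.div_lt_self (by omega) (by omega)) c hc
      · have : n % 2 = 0 ∨ n % 2 = 1 := by omega
        rcases this with h1 | h1 <;> simp [hc, h1, Nat.digitChar]

lemma pvZfill_pvBits (n : Nat) (w : Int) :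
    PySem.Chars.zfill (pvBits n) w = pvPad w.toNat (pvBits n) := by
  rw [PySem.Chars.zfill.eq_def, pvPad]
  split
  · rename_i h
    have : w.toNat - (pvBits n).length = 0 := by omega
    simp [this]
  · rename_i h
    rcases hb : pvBits n with _ | ⟨c, rest⟩
    · exact absurd hb (pvBits_ne_nil n)
    · have hc := pvBits_mem n c (by rw [hb]; simp)
      have : ¬ (c = '+' ∨ c = '-') := by rcases hc with h | h <;> simp [h] <;> decide
      simp [this]

lemma pvBits_len_le (n i : Nat) (hn : 1 ≤ n) (h : i < 2 ^ n) : (pvBits i).length ≤ n := by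
  induction i using Nat.strong_induction_on generalizing n with
  | _ i ih =>
    rw [pvBits]
    split
    · simpa using hn
    · rename_i hi
      have hn2 : 2 ≤ n := by
        by_contra hc
        have : n = 1 := by omega
        subst this
        omega
      have := ih (i / 2) (Nat.div_lt_self (by omega) (by omega)) (n - 1) (by omega)
        (by
          have : 2 ^ n = 2 * 2 ^ (n - 1) := by
            rw [← pow_succ']
            congr 1
            omega
          omega)
      simp only [List.length_append, List.length_singleton]
      omega

lemma pvPad_eq_of_ge (w : Nat) (cs : List Char) (h : w ≤ cs.length) : pvPad w cs = cs := by
  have : w - cs.length = 0 := by omega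
  simp [pvPad, this]

lemma pvPad_succ (n : Nat) (cs : List Char) (h : cs.length ≤ n) :
    pvPad (n + 1) cs = '0' :: pvPad n cs := by
  have h1 : n + 1 - cs.length = (n - cs.length) + 1 := by omega
  simp [pvPad, h1, List.replicate_succ]

lemma pvBits_high (n i : Nat) (hn : 1 ≤ n) (h1 : 2 ^ n ≤ i) (h2 : i < 2 ^ (n + 1)) :
    pvBits i = '1' :: pvPad n (pvBits (i - 2 ^ n)) := by
  induction n using Nat.strong_induction_on generalizing i with
  | _ n ih =>
    rcases Nat.lt_or_ge n 2 with hn2 | hn2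
    · -- n = 1, i ∈ {2, 3}
      have : n = 1 := by omega
      subst this
      have : i = 2 ∨ i = 3 := by omega
      rcases this with h | h <;> subst h <;>
        · rw [pvBits]
          norm_num
          rw [pvBits, pvBits]
          simp [pvPad, pvBits, Nat.digitChar]
    · -- n ≥ 2, i ≥ 4
      have hi4 : 4 ≤ i := by
        have : 4 = 2 ^ 2 := rfl
        have := Nat.pow_le_pow_right (show 1 ≤ 2 by omega) hn2
        omega
      rw [pvBits]
      have hni : ¬ i < 2 := by omega
      simp only [hni, dif_neg, not_false_iff]
      have hpow : 2 ^ n = 2 * 2 ^ (n - 1) := by rw [← pow_succ']; congr 1; omega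
      have hpow1 : 2 ^ (n + 1) = 2 * 2 ^ n := by rw [← pow_succ']
      have hd1 : 2 ^ (n - 1) ≤ i / 2 := by omega
      have hd2 : i / 2 < 2 ^ (n - 1 + 1) := by
        have : n - 1 + 1 = n := by omega
        rw [this]
        omega
      rw [ih (n - 1) (by omega) (i / 2) (by omega) hd1 hd2]
      -- now show '1' :: pvPad (n-1) (pvBits (i/2 - 2^(n-1))) ++ [digitChar (i % 2)]
      --        = '1' :: pvPad n (pvBits (i - 2^n))
      have hq : i / 2 - 2 ^ (n - 1) = (i - 2 ^ n) / 2 := by omega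
      have hr : i % 2 = (i - 2 ^ n) % 2 := by omega
      set m := i - 2 ^ n with hm
      have hmlt : m < 2 ^ n := by omega
      rcases Nat.lt_or_ge m 2 with hm2 | hm2
      · -- m = 0 or 1 : both sides are n-1 zeros, then the digit
        have hb : pvBits m = [Nat.digitChar m] := by rw [pvBits]; simp [hm2]
        have hbd : pvBits (m / 2) = [Nat.digitChar 0] := by
          have : m / 2 = 0 := by omega
          rw [this, pvBits]; simp
        rw [hq, hr] at *
        rw [hbd, hb]
        have e1 : pvPad (n - 1) [Nat.digitChar 0] = List.replicate (n - 2) '0' ++ ['0'] := by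
          simp [pvPad, Nat.digitChar]; omega
        have e2 : pvPad n [Nat.digitChar m] = List.replicate (n - 1) '0' ++ [Nat.digitChar m] := by
          simp [pvPad]
        rw [e1, e2]
        have hmd : Nat.digitChar (m % 2) = Nat.digitChar m := by
          congr 1; omega
        rw [hmd]
        have : List.replicate (n - 1) '0' = List.replicate (n - 2) '0' ++ ['0'] := by
          have : n - 1 = (n - 2) + 1 := by omega
          rw [this, List.replicate_succ']
        rw [this]
        simp
      · -- m ≥ 2 : unfold pvBits m
        conv_rhs => rw [pvBits]
        have : ¬ m < 2 := by omega
        simp only [this, dif_neg, not_false_iff]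
        rw [hq, hr]
        have hlen2 : (pvBits (m / 2)).length ≤ n - 2 ∨ True := Or.inr trivial
        -- pad arithmetic
        have hlenle : (pvBits (m / 2)).length ≤ n - 1 := by
          apply pvBits_len_le _ _ (by omega)
          have : m / 2 < 2 ^ (n - 1) := by omega
          exact this
        simp only [pvPad, List.length_append, List.length_singleton, List.cons_append]
        have : n - (List.length (pvBits (m / 2)) + 1) = (n - 1) - List.length (pvBits (m / 2)) := by omega
        rw [this]
        simp [List.append_assoc]

def pvZipC (bm : List Char) (xs : List Int) : List Int :=
  ((bm.zip xs).filter (fun p => p.1 == '1')).map (fun p => p.2)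

lemma pvEnumFilter (xs : List Int) : ∀ (pre bm : List Char), xs.length ≤ bm.length →
    ((PySem.List.enumerate xs (pre.length : Int)).filter
        (fun p => PySem.List.pyGet? (pre ++ bm) p.1 == some '1')).map (fun p => p.2)
      = pvZipC bm xs := by
  induction xs with
  | nil => intro pre bm h; simp [PySem.List.enumerate_nil, pvZipC]
  | cons y ys ih =>
    intro pre bm h
    rcases bm with _ | ⟨b, bs⟩
    · simp at h
    · rw [PySem.List.enumerate_cons, List.filter_cons]
      have hget : PySem.List.pyGet? (pre ++ b :: bs) ((pre.length : Int)) = some b :=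
        PySem.List.pyGet?_append_length pre bs b
      have hcast : (pre.length : Int) + 1 = ((pre ++ [b]).length : Int) := by
        simp
      have happ : pre ++ b :: bs = (pre ++ [b]) ++ bs := by simp
      have ih' := ih (pre ++ [b]) bs (by simpa using h)
      by_cases hb : b = '1'
      · subst hb
        simp only [hget]
        rw [hcast, happ]
        simp only [beq_self_eq_true, if_true, List.map_cons]
        rw [ih']
        simp [pvZipC, List.zip_cons_cons, List.filter_cons]
      · have : (PySem.List.pyGet? (pre ++ b :: bs) ((pre.length : Int)) == some '1') = false := by
          simp [hget, hb]
        simp only [this, if_neg, Bool.false_eq_true, not_false_iff]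
        rw [hcast, happ]
        rw [ih']
        have : (b == '1') = false := by simp [hb]
        simp [pvZipC, List.zip_cons_cons, List.filter_cons, this]

lemma pvContainers_eq (xs : List Int) (i : Int) (h : 0 ≤ i) :
    pvContainers xs i = pvZipC (pvPad xs.length (pvBits i.toNat)) xs := by
  have hbm : PySem.List.slice (PySem.Int.toBinChars0b i) (some 2) none = pvBits i.toNat := by
    rw [PySem.Int.toBinChars0b]
    have : ¬ i < 0 := by omega
    simp only [this, if_neg, not_false_iff]
    rw [PySem.List.slice_from _ (by omega : (0:Int) ≤ 2)]
    simp [pvBits_eq_toDigits]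
  rw [pvContainers]
  simp only [hbm, PySem.List.len_eq]
  rw [pvZfill_pvBits]
  have hlen : xs.length ≤ (pvPad xs.length (pvBits i.toNat)).length := by
    simp only [pvPad, List.length_append, List.length_replicate]
    omega
  have := pvEnumFilter xs [] (pvPad xs.length (pvBits i.toNat)) hlen
  simpa using this

lemma pvContainers_nil (i : Int) : pvContainers [] i = [] := by
  simp [pvContainers, PySem.List.enumerate_nil]

lemma pvContainers_low (x : Int) (xs : List Int) (i : Int) (h0 : 0 ≤ i)
    (h : i < 2 ^ xs.length) : pvContainers (x :: xs) i = pvContainers xs i := by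
  have hlt : i.toNat < 2 ^ xs.length := by
    have : ((2:Int) ^ xs.length) = ((2 ^ xs.length : Nat) : Int) := by push_cast; ring
    omega
  rw [pvContainers_eq _ _ h0, pvContainers_eq _ _ h0]
  rcases Nat.eq_zero_or_pos xs.length with hn | hn
  · -- xs = []
    have hxs : xs = [] := List.length_eq_zero_iff.mp hn
    subst hxs
    have : i = 0 := by simp at h; omega
    subst this
    have hb : pvBits 0 = ['0'] := by rw [pvBits]; simp; decide
    simp [pvPad, hb, pvZipC]
  · have hle : (pvBits i.toNat).length ≤ xs.length := pvBits_len_le _ _ hn hlt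
    rw [show (x :: xs).length = xs.length + 1 from rfl, pvPad_succ _ _ hle]
    simp [pvZipC, List.zip_cons_cons, List.filter_cons]

lemma pvContainers_high (x : Int) (xs : List Int) (i : Int)
    (h1 : (2 : Int) ^ xs.length ≤ i) (h2 : i < 2 ^ (xs.length + 1)) :
    pvContainers (x :: xs) i = x :: pvContainers xs (i - 2 ^ xs.length) := by
  have h0 : 0 ≤ i := le_trans (by positivity) h1
  have hcast : ((2:Int) ^ xs.length) = ((2 ^ xs.length : Nat) : Int) := by push_cast; ring
  have hcast1 : ((2:Int) ^ (xs.length + 1)) = ((2 ^ (xs.length + 1) : Nat) : Int) := by push_cast; ring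
  have hge : 2 ^ xs.length ≤ i.toNat := by omega
  have hlt : i.toNat < 2 ^ (xs.length + 1) := by omega
  have h0' : (0:Int) ≤ i - 2 ^ xs.length := by omega
  have htn : (i - 2 ^ xs.length).toNat = i.toNat - 2 ^ xs.length := by omega
  rw [pvContainers_eq _ _ h0, pvContainers_eq _ _ h0', htn]
  rcases Nat.eq_zero_or_pos xs.length with hn | hn
  · have hxs : xs = [] := List.length_eq_zero_iff.mp hn
    subst hxs
    have : i.toNat = 1 := by simp at hge hlt ⊢; omega
    rw [this]
    have hb1 : pvBits 1 = ['1'] := by rw [pvBits]; simp; decide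
    have hb0 : pvBits (1 - 2 ^ 0) = ['0'] := by rw [pvBits]; simp; decide
    simp [hb1, pvPad, pvZipC]
  · have hsplit := pvBits_high xs.length i.toNat hn hge hlt
    rw [hsplit]
    have hlenpad : xs.length ≤ (pvPad xs.length (pvBits (i.toNat - 2 ^ xs.length))).length := by
      simp only [pvPad, List.length_append, List.length_replicate]; omega
    have : pvPad (x :: xs).length ('1' :: pvPad xs.length (pvBits (i.toNat - 2 ^ xs.length)))
        = '1' :: pvPad xs.length (pvBits (i.toNat - 2 ^ xs.length)) := by
      apply pvPad_eq_of_ge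
      simp only [List.length_cons]
      omega
    rw [this]
    simp [pvZipC, List.zip_cons_cons, List.filter_cons]

lemma pvFlatMapPairPerm (x : Int) (L : List (List Int)) :
    (L.flatMap (fun s => [s, x :: s])).Perm (L ++ L.map (x :: ·)) := by
  induction L with
  | nil => simp
  | cons s L ih =>
    simp only [List.flatMap_cons, List.map_cons, List.cons_append]
    refine ((ih.cons _).cons _).trans ?_
    exact List.Perm.cons _ (List.perm_middle.symm)

lemma pvSublistsConsPerm (x : Int) (l : List Int) :
    (x :: l).sublists.Perm (l.sublists ++ l.sublists.map (x :: ·)) := by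
  rw [List.sublists_cons]
  exact pvFlatMapPairPerm x l.sublists

lemma pvPermContainers (xs : List Int) :
    ((List.range (2 ^ xs.length)).map (fun (k : Nat) => pvContainers xs (k : Int))).Perm xs.sublists := by
  induction xs with
  | nil =>
    simp only [List.length_nil, pow_zero, List.range_one, List.map_cons, List.map_nil,
      List.sublists_nil]
    rw [pvContainers_nil]
  | cons x xs ih =>
    have hsplit : List.range (2 ^ (x :: xs).length) =
        List.range (2 ^ xs.length) ++ (List.range (2 ^ xs.length)).map (2 ^ xs.length + ·) := by
      rw [show (2:Nat) ^ (x :: xs).length = 2 ^ xs.length + 2 ^ xs.length by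
        simp [List.length_cons]; ring]
      exact List.range_add
    rw [hsplit, List.map_append, List.map_map]
    have hlow : (List.range (2 ^ xs.length)).map (fun (k : Nat) => pvContainers (x :: xs) (k : Int))
        = (List.range (2 ^ xs.length)).map (fun (k : Nat) => pvContainers xs (k : Int)) := by
      apply List.map_congr_left
      intro k hk
      simp only [List.mem_range] at hk
      apply pvContainers_low _ _ _ (by positivity)
      have : ((2:Int) ^ xs.length) = ((2 ^ xs.length : Nat) : Int) := by push_cast; ring
      omega
    have hhigh : (List.range (2 ^ xs.length)).map
          ((fun (k : Nat) => pvContainers (x :: xs) (k : Int)) ∘ (2 ^ xs.length + ·))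
        = (List.range (2 ^ xs.length)).map (fun (k : Nat) => x :: pvContainers xs (k : Int)) := by
      apply List.map_congr_left
      intro k hk
      simp only [List.mem_range] at hk
      simp only [Function.comp_apply]
      have hcast : (((2 ^ xs.length + k : Nat)) : Int) = 2 ^ xs.length + (k : Int) := by
        push_cast; ring
      rw [hcast]
      have h2 : ((2:Int) ^ xs.length) = ((2 ^ xs.length : Nat) : Int) := by push_cast; ring
      rw [pvContainers_high x xs _ (by omega) (by
        have : ((2:Int) ^ (xs.length + 1)) = ((2 ^ (xs.length + 1) : Nat) : Int) := by push_cast; ring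
        rw [this]
        have : (2:Nat) ^ (xs.length + 1) = 2 ^ xs.length + 2 ^ xs.length := by ring
        omega)]
      congr 1
      ring_nf
    rw [hlow, hhigh]
    have : (List.range (2 ^ xs.length)).map (fun (k : Nat) => x :: pvContainers xs (k : Int))
        = ((List.range (2 ^ xs.length)).map (fun (k : Nat) => pvContainers xs (k : Int))).map (x :: ·) := by
      rw [List.map_map]; rfl
    rw [this]
    exact ((ih.append (ih.map _))).trans (pvSublistsConsPerm x xs).symm

def pvOmin (m : Option Int) (k : Int) : Option Int :=
  match m with
  | none => some k
  | some v => some (min v k)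

def pvG (e : Int) (m : Option Int) (cs : List Int) : Option Int :=
  if cs.sum == e then pvOmin m ((cs.length : Int)) else m

lemma pvG_rc (e : Int) : ∀ (m : Option Int) (a b : List Int),
    pvG e (pvG e m a) b = pvG e (pvG e m b) a := by
  intro m a b
  unfold pvG pvOmin
  rcases m with _ | v <;> split_ifs <;> simp_all <;> omega

lemma pvFoldlOminSome (ks : List Int) : ∀ (v : Int), ks.foldl pvOmin (some v) = some (ks.foldl min v) := by
  induction ks with
  | nil => intro v; rfl
  | cons k ks ih => intro v; simp only [List.foldl_cons, pvOmin]; exact ih _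

lemma pvFoldlG_none_iff (ks : List Int) :
    (ks.foldl pvOmin none = none) ↔ ks = [] := by
  rcases ks with _ | ⟨k, ks⟩
  · simp
  · simp only [List.foldl_cons]
    show (ks.foldl pvOmin (pvOmin none k) = none) ↔ _
    rw [show pvOmin none k = some k from rfl, pvFoldlOminSome]
    simp

lemma pvFoldlG_some (ks : List Int) (m : Int) (h : ks.foldl pvOmin none = some m) :
    m ∈ ks ∧ ∀ y ∈ ks, m ≤ y := by
  rcases ks with _ | ⟨k, ks⟩
  · simp at h
  · simp only [List.foldl_cons] at h
    rw [show pvOmin none k = some k from rfl, pvFoldlOminSome] at h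
    have hm : m = ks.foldl min k := by injection h with h; omega
    subst hm
    constructor
    · rcases PySem.List.foldl_min_mem ks k with h1 | h1
      · rw [h1]; exact List.mem_cons_self
      · exact List.mem_cons_of_mem _ h1
    · intro y hy
      rcases List.mem_cons.mp hy with rfl | hy
      · exact (PySem.List.foldl_min_le ks y).1
      · exact (PySem.List.foldl_min_le ks k).2 y hy

lemma pvLoop1Pair (xs : List Int) (e : Int) (L : List Int) :
    ∀ (st : Option Int × List Int),
    (L.foldl (fun (st : Option Int × List Int) i =>
      let containers := pvContainers xs i
      if ((match st.1 with
           | none => true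
           | some v => decide (PySem.List.len containers < v)) && (containers.sum == e))
      then (some (PySem.List.len containers), containers) else st) st).1
    = L.foldl (fun m i => pvG e m (pvContainers xs i)) st.1 := by
  induction L with
  | nil => intro st; rfl
  | cons i L ih =>
    intro st
    simp only [List.foldl_cons]
    rw [ih]
    congr 1
    -- step agreement on the first component
    set cs := pvContainers xs i with hcs
    rcases st with ⟨m, mc⟩
    rcases m with _ | v
    · simp only [pvG, pvOmin, PySem.List.len_eq]
      by_cases hs : cs.sum == e
      · simp [hs]
      · simp [hs]
    · simp only [pvG, pvOmin, PySem.List.len_eq]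
      by_cases hs : cs.sum == e
      · by_cases hlt : ((cs.length : Int)) < v
        · have hmin : min v ((cs.length : Int)) = (cs.length : Int) := min_eq_right (le_of_lt hlt)
          simp [hs, hlt, hmin]
        · have hmin : min v ((cs.length : Int)) = v := min_eq_left (by omega)
          simp [hs, hlt, hmin]
      · simp [hs]

lemma pvFoldlInsertGetD {κ : Type} [BEq κ] [LawfulBEq κ] [DecidableEq κ] {α : Type}
    (f : α → κ) (g : α → Int) :
    ∀ (l : List α) (d : PySem.Dict κ Int), (l.map f).Nodup → ∀ (q : κ),
    (l.foldl (fun d p => d.insert (f p) (d.getD (f p) 0 + g p)) d).getD q 0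
      = d.getD q 0 + ((l.filter (fun p => f p == q)).map g).sum := by
  intro l
  induction l with
  | nil => intro d _ q; simp
  | cons p l ih =>
    intro d hnd q
    simp only [List.map_cons, List.nodup_cons] at hnd
    simp only [List.foldl_cons, List.filter_cons]
    rw [ih _ hnd.2 q]
    rw [PySem.Dict.getD_insert]
    by_cases hq : q = f p
    · subst hq
      have hfl : l.filter (fun p' => f p' == f p) = [] := by
        rw [List.filter_eq_nil_iff]
        intro a ha
        simp only [beq_iff_eq]
        intro hc
        exact hnd.1 (hc ▸ List.mem_map_of_mem ha)
      simp [hfl]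
    · have : (f p == q) = false := by simpa using fun h => hq h.symm
      simp [this, if_neg hq]

lemma pvSumFilterItems {κ : Type} [BEq κ] [LawfulBEq κ] :
    ∀ (l : List (κ × Int)), (l.map Prod.fst).Nodup → ∀ (k0 : κ),
    ((l.filter (fun p => p.1 == k0)).map (fun p => p.2)).sum
      = (PySem.Dict.mk l).getD k0 0 := by
  intro l
  induction l with
  | nil => intro _ k0; simp [PySem.Dict.getD_eq_get?_getD]; rfl
  | cons p l ih =>
    intro hnd k0
    simp only [List.map_cons, List.nodup_cons] at hnd
    rcases p with ⟨k, v⟩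
    rw [List.filter_cons]
    rw [PySem.Dict.getD_eq_get?_getD, PySem.Dict.get?_mk_cons]
    by_cases hk : k = k0
    · subst hk
      have hfl : l.filter (fun p => p.1 == k) = [] := by
        rw [List.filter_eq_nil_iff]
        intro a ha
        simp only [beq_iff_eq]
        intro hc
        have h' := List.mem_map_of_mem (f := Prod.fst) ha
        rw [hc] at h'
        exact hnd.1 h'
      simp [hfl]
    · have hbe : (k == k0) = false := by simpa using hk
      simp only [hbe, if_neg, Bool.false_eq_true, not_false_iff]
      rw [ih hnd.2 k0, PySem.Dict.getD_eq_get?_getD]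

def pvCnt (p : List Int) (q : Int × Int) : Nat :=
  p.sublists.countP (fun cs => decide (((cs.length : Int)) = q.1 ∧ cs.sum = q.2))

def pvInv (p : List Int) (d : PySem.Dict (Int × Int) Int) : Prop :=
  d.keys.Nodup ∧ (∀ q, d.getD q 0 = (pvCnt p q : Int)) ∧
    (∀ q, d.contains q = true ↔ 0 < pvCnt p q)

lemma pvCnt_append (p : List Int) (c : Int) (q : Int × Int) :
    pvCnt (p ++ [c]) q = pvCnt p q + pvCnt p (q.1 - 1, q.2 - c) := by
  unfold pvCnt
  rw [List.sublists_concat, List.countP_append, List.countP_map]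
  congr 1
  apply List.countP_congr
  intro cs _
  simp only [Function.comp_apply, List.length_append, List.sum_append, List.length_cons,
    List.length_nil, List.sum_cons, List.sum_nil, decide_eq_true_eq]
  push_cast
  constructor <;> intro h <;> exact ⟨by omega, by omega⟩

lemma pvInv_init : pvInv [] (PySem.Dict.empty.insert ((0 : Int), (0 : Int)) 1) := by
  have hcnt0 : ∀ q : Int × Int, pvCnt [] q = if q = ((0:Int), (0:Int)) then 1 else 0 := by
    intro q
    rcases q with ⟨q1, q2⟩
    unfold pvCnt
    simp only [List.sublists_nil, List.countP_cons, List.countP_nil, List.length_nil,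
      List.sum_nil, Nat.cast_zero, zero_add, Prod.mk.injEq]
    by_cases h : q1 = 0 ∧ q2 = 0
    · simp [h.1, h.2]
    · rw [if_neg h]
      have h' : ¬ ((0:Int) = q1 ∧ (0:Int) = q2) := fun hc => h ⟨hc.1.symm, hc.2.symm⟩
      simp [h']
  refine ⟨by decide, ?_, ?_⟩
  · intro q
    rw [PySem.Dict.getD_insert, hcnt0 q]
    by_cases h : q = ((0:Int), (0:Int))
    · simp [h]
    · simp [h, PySem.Dict.getD_empty]
  · intro q
    rw [PySem.Dict.contains_insert, hcnt0 q]
    by_cases h : q = ((0:Int), (0:Int))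
    · simp [h]
    · have h3 : (q == ((0:Int), (0:Int))) = false := by simpa using h
      simp [h3, h, PySem.Dict.contains_empty]

lemma pvInv_step (p : List Int) (d : PySem.Dict (Int × Int) Int) (c : Int) (h : pvInv p d) :
    pvInv (p ++ [c])
      (d.items.foldl (fun new pr =>
        new.insert (pr.1.1 + 1, pr.1.2 + c) (new.getD (pr.1.1 + 1, pr.1.2 + c) 0 + pr.2)) d) := by
  obtain ⟨hnd, hcnt, hcon⟩ := h
  have hkeys : d.keys = d.items.map Prod.fst := rfl
  have hndmap : (d.items.map (fun pr => (pr.1.1 + 1, pr.1.2 + c))).Nodup := by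
    have he : d.items.map (fun (pr : (Int × Int) × Int) => (pr.1.1 + 1, pr.1.2 + c))
        = (d.items.map Prod.fst).map (fun k => (k.1 + 1, k.2 + c)) := by
      rw [List.map_map]
      rfl
    rw [he, ← hkeys]
    apply hnd.map
    intro a b hab
    rcases a with ⟨a1, a2⟩; rcases b with ⟨b1, b2⟩
    simp only [Prod.mk.injEq] at hab
    simp [Prod.ext_iff]
    omega
  refine ⟨?_, ?_, ?_⟩
  · exact PySem.Dict.nodup_keys_foldl_insert_key d.items _ _ d hnd
  · intro q
    rw [pvFoldlInsertGetD (fun pr => (pr.1.1 + 1, pr.1.2 + c)) (fun pr => pr.2) d.items d hndmap q]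
    have hfc : d.items.filter (fun pr => ((pr.1.1 + 1, pr.1.2 + c) : Int × Int) == q)
        = d.items.filter (fun pr => pr.1 == (q.1 - 1, q.2 - c)) := by
      apply List.filter_congr
      intro pr _
      rw [Bool.eq_iff_iff]
      rcases pr with ⟨⟨k, s⟩, v⟩; rcases q with ⟨q1, q2⟩
      simp only [beq_iff_eq, Prod.mk.injEq]
      omega
    rw [hfc]
    have hs := pvSumFilterItems d.items (hkeys ▸ hnd) (q.1 - 1, q.2 - c)
    rw [show PySem.Dict.mk d.items = d from rfl] at hs
    rw [hs, hcnt q, hcnt (q.1 - 1, q.2 - c), pvCnt_append]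
    push_cast
    ring
  · intro q
    rw [PySem.Dict.contains_iff_mem_keys,
      PySem.Dict.keys_foldl_insert_key d.items (fun pr => (pr.1.1 + 1, pr.1.2 + c)) _ d,
      PySem.Set.mem_update, pvCnt_append]
    have h1 : q ∈ d.keys ↔ 0 < pvCnt p q := by
      rw [← PySem.Dict.contains_iff_mem_keys]
      exact hcon q
    have h2 : q ∈ d.items.map (fun pr => (pr.1.1 + 1, pr.1.2 + c)) ↔
        0 < pvCnt p (q.1 - 1, q.2 - c) := by
      rw [List.mem_map]
      constructor
      · rintro ⟨pr, hmem, heq⟩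
        have : pr.1 = (q.1 - 1, q.2 - c) := by
          rcases pr with ⟨⟨k, s⟩, v⟩; rcases q with ⟨q1, q2⟩
          simp only [Prod.mk.injEq] at heq ⊢
          omega
        have hk : (q.1 - 1, q.2 - c) ∈ d.keys := by
          rw [hkeys]
          exact this ▸ List.mem_map_of_mem (f := Prod.fst) hmem
        exact (hcon _).mp ((PySem.Dict.contains_iff_mem_keys d _).mpr hk)
      · intro hpos
        have hk : (q.1 - 1, q.2 - c) ∈ d.keys := by
          rw [← PySem.Dict.contains_iff_mem_keys]
          exact (hcon _).mpr hpos
        rw [hkeys, List.mem_map] at hk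
        obtain ⟨pr, hmem, heq⟩ := hk
        refine ⟨pr, hmem, ?_⟩
        rcases pr with ⟨⟨k, s⟩, v⟩; rcases q with ⟨q1, q2⟩
        simp only [Prod.mk.injEq] at heq ⊢
        omega
    rw [h1, h2]
    omega

lemma pvInv_foldl : ∀ (xs p : List Int) (d : PySem.Dict (Int × Int) Int), pvInv p d →
    pvInv (p ++ xs)
      (xs.foldl (fun dp c =>
        dp.items.foldl (fun new pr =>
          new.insert (pr.1.1 + 1, pr.1.2 + c) (new.getD (pr.1.1 + 1, pr.1.2 + c) 0 + pr.2)) dp) d) := by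
  intro xs
  induction xs with
  | nil => intro p d h; simpa using h
  | cons c xs ih =>
    intro p d h
    have := ih (p ++ [c]) _ (pvInv_step p d c h)
    simpa using this



lemma pvRangeEq (n : Nat) : PySem.List.pyRange 0 ((2 : Int) ^ n) 1
    = (List.range (2 ^ n)).map (fun (k : Nat) => (k : Int)) := by
  rw [PySem.List.pyRange_one]
  have h2 : (((2 : Int) ^ n) - 0).toNat = 2 ^ n := by
    rw [sub_zero, show ((2:Int) ^ n) = ((2 ^ n : Nat) : Int) from by push_cast; ring,
      Int.toNat_natCast]
  rw [h2]
  apply List.map_congr_left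
  intro k _
  simp

lemma pvMemSizes (xs : List Int) (e : Int) (dp : PySem.Dict (Int × Int) Int)
    (h : pvInv xs dp) (k : Int) :
    k ∈ (dp.items.filter (fun p => p.1.2 == e)).map (fun p => p.1.1) ↔ 0 < pvCnt xs (k, e) := by
  obtain ⟨hnd, _, hcon⟩ := h
  rw [List.mem_map]
  constructor
  · rintro ⟨p, hp, rfl⟩
    rw [List.mem_filter] at hp
    have he : p.1.2 = e := by simpa using hp.2
    have hkmem : p.1 ∈ dp.keys := List.mem_map_of_mem (f := Prod.fst) hp.1
    have := (hcon p.1).mp ((PySem.Dict.contains_iff_mem_keys dp p.1).mpr hkmem)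
    rwa [show p.1 = (p.1.1, e) from by rw [← he]] at this
  · intro hpos
    have hkmem : ((k, e) : Int × Int) ∈ dp.keys :=
      (PySem.Dict.contains_iff_mem_keys dp _).mp ((hcon _).mpr hpos)
    rw [show dp.keys = dp.items.map Prod.fst from rfl, List.mem_map] at hkmem
    obtain ⟨p, hp, hpe⟩ := hkmem
    refine ⟨p, List.mem_filter.mpr ⟨hp, by simp [hpe]⟩, by rw [hpe]⟩

lemma pvMemK (xs : List Int) (e : Int) (k : Int) :
    k ∈ ((xs.sublists.filter (fun cs => cs.sum == e)).map (fun cs => ((cs.length : Int))))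
      ↔ 0 < pvCnt xs (k, e) := by
  rw [List.mem_map]
  unfold pvCnt
  rw [List.countP_pos_iff]
  constructor
  · rintro ⟨cs, hcs, rfl⟩
    rw [List.mem_filter] at hcs
    exact ⟨cs, hcs.1, by simp [beq_iff_eq] at hcs ⊢; exact hcs.2⟩
  · rintro ⟨cs, hcs, hp⟩
    simp only [decide_eq_true_eq] at hp
    exact ⟨cs, List.mem_filter.mpr ⟨hcs, by simp [hp.2]⟩, hp.1⟩

theorem pvMain (xs : List Int) (e : Int) : part2 xs e = part2_alt xs e := by
  -- names for the pieces
  have hdp := pvInv_foldl xs [] (PySem.Dict.empty.insert ((0:Int), (0:Int)) 1) pvInv_init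
  rw [List.nil_append] at hdp
  set dp : PySem.Dict (Int × Int) Int := xs.foldl (fun dp c =>
      dp.items.foldl (fun new pr =>
        new.insert (pr.1.1 + 1, pr.1.2 + c) (new.getD (pr.1.1 + 1, pr.1.2 + c) 0 + pr.2)) dp)
    (PySem.Dict.empty.insert ((0:Int), (0:Int)) 1) with hdpdef
  set S := xs.sublists with hS
  set K := ((S.filter (fun cs => cs.sum == e)).map (fun cs => ((cs.length : Int)))) with hK
  set m := K.foldl pvOmin none with hm
  -- loop 1 computes m
  have hperm : ((List.range (2 ^ xs.length)).map (fun (k : Nat) => pvContainers xs (k : Int))).Perm S :=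
    pvPermContainers xs
  have hloop1 : ((PySem.List.pyRange 0 (2 ^ xs.length) 1).foldl
    (fun (st : Option Int × List Int) i =>
      let containers := pvContainers xs i
      if ((match st.1 with
           | none => true
           | some v => decide (PySem.List.len containers < v)) && (containers.sum == e))
      then (some (PySem.List.len containers), containers) else st)
    (none, [])).1 = m := by
    rw [pvLoop1Pair xs e _ (none, [])]
    rw [pvRangeEq, List.foldl_map]
    have h1 : (List.range (2 ^ xs.length)).foldl
        (fun (mm : Option Int) (k : Nat) => pvG e mm (pvContainers xs (k : Int))) none
        = ((List.range (2 ^ xs.length)).map (fun (k : Nat) => pvContainers xs (k : Int))).foldl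
            (pvG e) none := by
      rw [List.foldl_map]
    rw [h1]
    rw [@List.Perm.foldl_eq _ _ (pvG e) _ _ ⟨fun b a₁ a₂ => pvG_rc e b a₁ a₂⟩ hperm none]
    rw [hm, hK]
    unfold pvG
    rw [PySem.List.foldl_if_eq_foldl_filter (fun cs => cs.sum == e)
      (fun mm cs => pvOmin mm ((cs.length : Int))) S none, List.foldl_map]
  -- loop 2 as a countP over sublists
  have hloop2 : ∀ (p : List Int → Bool),
      (PySem.List.pyRange 0 (2 ^ xs.length) 1).foldl
        (fun (cnt : Int) i => if p (pvContainers xs i) then cnt + 1 else cnt) 0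
      = (S.countP p : Int) := by
    intro p
    rw [PySem.List.foldl_if_add_one (fun i => p (pvContainers xs i))]
    rw [pvRangeEq, List.countP_map, ← List.Perm.countP_eq _ hperm, List.countP_map]
    rw [zero_add]
    apply congrArg
    apply List.countP_congr
    intro x _
    exact Iff.rfl
  -- endgame
  simp only [part2, part2_alt]
  rw [hloop1]
  rw [← hdpdef]
  rcases hmn : m with _ | v
  · -- no subset sums to e : both return 0
    have hKnil : K = [] := (pvFoldlG_none_iff K).mp hmn
    have hsz : ((dp.items.filter (fun p => p.1.2 == e)).map (fun p => p.1.1)) = [] := by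
      rw [List.eq_nil_iff_forall_not_mem]
      intro k hk
      have h1 := (pvMemSizes xs e dp hdp k).mp hk
      have h2 : k ∈ K := by rw [hK]; exact (pvMemK xs e k).mpr h1
      rw [hKnil] at h2
      simp at h2
    rw [hsz]
    have hz : (PySem.List.min? ([] : List Int) (fun k => k)) = none := rfl
    rw [hz]
    simp only [PySem.List.len_eq]
    have := hloop2 (fun _ => false)
    simp only [Bool.false_and] at *
    rw [show (S.countP (fun _ => false) : Int) = 0 by simp] at this
    exact this
  · -- minimum size v
    have hvK := pvFoldlG_some K v (hm ▸ hmn)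
    have hA := hloop2 (fun cs => (((cs.length : Int)) == v) && (cs.sum == e))
    simp only [PySem.List.len_eq]
    refine hA.trans ?_
    have hAc : S.countP (fun cs => (((cs.length : Int)) == v) && (cs.sum == e))
        = pvCnt xs (v, e) := by
      unfold pvCnt
      apply List.countP_congr
      intro cs _
      simp only [Bool.and_eq_true, beq_iff_eq, decide_eq_true_eq]
    rw [hAc]
    -- B side
    have hsz_mem := pvMemSizes xs e dp hdp
    have hvsz : v ∈ (dp.items.filter (fun p => p.1.2 == e)).map (fun p => p.1.1) := by
      apply (hsz_mem v).mpr
      apply (pvMemK xs e v).mp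
      have := hvK.1
      rw [hK] at this
      exact this
    rcases hmin : PySem.List.min? ((dp.items.filter (fun p => p.1.2 == e)).map (fun p => p.1.1))
        (fun k => k) with _ | mv
    · rw [PySem.List.min?_eq_none_iff] at hmin
      rw [hmin] at hvsz
      simp at hvsz
    · have hmv_mem := PySem.List.min?_mem hmin
      have hmv_min := PySem.List.min?_isMin hmin
      have h1 : mv ≤ v := hmv_min v hvsz
      have h2 : v ≤ mv := by
        apply hvK.2
        rw [hK]
        exact (pvMemK xs e mv).mpr ((hsz_mem mv).mp hmv_mem)
      have : mv = v := le_antisymm h1 h2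
      subst this
      rw [hmin]
      show ((pvCnt xs (mv, e) : Nat) : Int) = dp.getD (mv, e) 0
      exact (hdp.2.1 (mv, e)).symm

-- ===== VERDICT (by name: the statement is the Claim_ definition above) =====
theorem part2_spec : Claim_equal_part2 := by
  intro _in eggnog _
  unfold Spec_part2
  exact pvMain _in eggnog
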